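-- pv_equiv track=rewrite | github.com/Guarrdon/portfolioplanner | backend/app/services/strategy_positions.py | _underlying_from_legs
-- ===== SOURCE A (Python) =====
-- from typing import Dict, List, Any, Optional
--
-- def _underlying_from_legs(legs: List[Dict[str, Any]]) -> str:
--     """Pick the security underlying out of a flattened tx's legs.
--
--     Schwab payloads put commission/fee entries (assetType=CURRENCY) BEFORE
--     the actual EQUITY/OPTION leg in transferItems — sometimes 4 fee rows
--     before the real ticker. We must skip those, otherwise every TRADE
--     transaction's "underlying" comes back as CURRENCY_USD.
--     """
--     if not legs:
--         return ""
--     # Pass 1: explicit option underlying or stock-class assetType.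
--     for leg in legs:
--         at = (leg.get("asset_type") or "").upper()
--         if at in {"EQUITY", "STOCK", "ETF", "MUTUAL_FUND", "COLLECTIVE_INVESTMENT", "OPTION"}:
--             u = leg.get("underlying") or leg.get("symbol") or ""
--             if u:
--                 return str(u).upper().lstrip("$")
--     # Pass 2: anything with a non-CURRENCY symbol.
--     for leg in legs:
--         at = (leg.get("asset_type") or "").upper()
--         if at == "CURRENCY":
--             continue
--         u = leg.get("underlying") or leg.get("symbol") or ""
--         if u:
--             return str(u).upper().lstrip("$")
--     return ""
-- ===== SOURCE B (Python) =====
-- from typing import Dict, List, Any, Optional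
--
-- _STOCK_CLASS = {"EQUITY", "STOCK", "ETF", "MUTUAL_FUND", "COLLECTIVE_INVESTMENT", "OPTION"}
--
--
-- def _underlying_from_legs(legs: List[Dict[str, Any]]) -> str:
--     """Single pass keeping two candidates: first stock/option-class leg and
--     first non-CURRENCY leg with a non-empty symbol; stock class wins."""
--     stock = None
--     noncur = None
--     for leg in legs:
--         at = (leg.get("asset_type") or "").upper()
--         u = leg.get("underlying") or leg.get("symbol") or ""
--         if not u:
--             continue
--         if stock is None and at in _STOCK_CLASS:
--             stock = u
--         if noncur is None and at != "CURRENCY":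
--             noncur = u
--     chosen = stock if stock is not None else noncur
--     return "" if chosen is None else str(chosen).upper().lstrip("$")
-- ===== Notes on version B (the rewrite author's own statement) =====
-- stated objective: simpler
-- what changed: Replaces A's empty-guard plus two sequential full scans with one loop that maintains two Optional candidates (first stock-class leg, first non-CURRENCY leg) and normalizes the chosen one once at the end.
import Mathlib
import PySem

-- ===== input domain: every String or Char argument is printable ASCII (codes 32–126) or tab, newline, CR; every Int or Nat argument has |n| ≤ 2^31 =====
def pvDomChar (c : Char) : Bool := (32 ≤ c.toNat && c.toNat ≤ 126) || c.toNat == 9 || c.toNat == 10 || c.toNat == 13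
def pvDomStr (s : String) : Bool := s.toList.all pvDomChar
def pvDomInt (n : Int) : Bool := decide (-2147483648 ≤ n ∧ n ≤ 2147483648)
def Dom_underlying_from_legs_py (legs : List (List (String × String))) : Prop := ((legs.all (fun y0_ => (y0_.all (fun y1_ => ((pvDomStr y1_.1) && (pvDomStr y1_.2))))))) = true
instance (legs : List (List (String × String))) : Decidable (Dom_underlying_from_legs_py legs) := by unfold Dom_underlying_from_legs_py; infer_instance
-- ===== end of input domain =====

-- B is a single-pass re-decomposition of A (two Optional candidates instead of two scans); same O(n) cost, return value proved equal.

-- shared transliteration helpers: 'leg.get(k) or ""' (dict = assoc list, first match),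
-- 'str(u).upper().lstrip("$")' (values are strings; lstrip("$") drops the leading '$' run — exact on ASCII),
-- and the stock-class asset_type set
def pvGetv (leg : List (String × String)) (k : String) : String :=
  match leg.find? (fun p => p.1 == k) with
  | some p => p.2
  | none => ""

def pvNorm (u : String) : String := String.ofList ((PySem.Str.upper u).toList.dropWhile (· == '$'))

def pvStockSet : List String := ["EQUITY", "STOCK", "ETF", "MUTUAL_FUND", "COLLECTIVE_INVESTMENT", "OPTION"]

-- 'leg.get("underlying") or leg.get("symbol") or ""'
def pvU (leg : List (String × String)) : String :=
  if pvGetv leg "underlying" ≠ "" then pvGetv leg "underlying" else pvGetv leg "symbol"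

-- ===== PORT A =====
-- Pass 1: explicit option underlying or stock-class assetType
def aPass1 : List (List (String × String)) → Option String
  | [] => none
  | leg :: rest =>
    let at_ := PySem.Str.upper (pvGetv leg "asset_type")
    if at_ ∈ pvStockSet then
      let u := pvU leg
      if u ≠ "" then some (pvNorm u) else aPass1 rest
    else aPass1 rest

-- Pass 2: anything with a non-CURRENCY symbol
def aPass2 : List (List (String × String)) → Option String
  | [] => none
  | leg :: rest =>
    let at_ := PySem.Str.upper (pvGetv leg "asset_type")
    if at_ = "CURRENCY" then aPass2 rest
    else
      let u := pvU leg
      if u ≠ "" then some (pvNorm u) else aPass2 rest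

def underlying_from_legs_py (legs : List (List (String × String))) : String :=
  if legs = [] then ""
  else
    match aPass1 legs with
    | some r => r
    | none =>
      match aPass2 legs with
      | some r => r
      | none => ""

-- ===== PORT B =====
-- one loop step: keep the first stock-class candidate and the first non-CURRENCY candidate
def bStep (acc : Option String × Option String) (leg : List (String × String)) :
    Option String × Option String :=
  let at_ := PySem.Str.upper (pvGetv leg "asset_type")
  let u := pvU leg
  if u = "" then acc
  else
    let s := if acc.1 = none ∧ at_ ∈ pvStockSet then some u else acc.1
    let n := if acc.2 = none ∧ at_ ≠ "CURRENCY" then some u else acc.2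
    (s, n)

def underlying_from_legs_py_alt (legs : List (List (String × String))) : String :=
  let st := legs.foldl bStep (none, none)
  let chosen : Option String := match st.1 with | some x => some x | none => st.2
  match chosen with
  | some u => pvNorm u
  | none => ""

-- ===== PRECONDITION & SPEC =====
def Spec_underlying_from_legs_py (legs : List (List (String × String))) (out : String) : Prop := out = underlying_from_legs_py_alt legs
instance (legs : List (List (String × String))) (out : String) : Decidable (Spec_underlying_from_legs_py legs out) := by unfold Spec_underlying_from_legs_py; infer_instance

-- ===== CLAIM (what is proved, stated in full; the proofs are below) =====
def Claim_equal_underlying_from_legs_py : Prop := ∀ (legs : List (List (String × String))), Dom_underlying_from_legs_py legs → Spec_underlying_from_legs_py legs (underlying_from_legs_py legs)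

-- ===== LEMMAS AND PROOFS =====

-- raw (unnormalized) first candidates of each pass
def p1 : List (List (String × String)) → Option String
  | [] => none
  | leg :: rest =>
    if PySem.Str.upper (pvGetv leg "asset_type") ∈ pvStockSet then
      if pvU leg ≠ "" then some (pvU leg) else p1 rest
    else p1 rest

def p2 : List (List (String × String)) → Option String
  | [] => none
  | leg :: rest =>
    if PySem.Str.upper (pvGetv leg "asset_type") = "CURRENCY" then p2 rest
    else if pvU leg ≠ "" then some (pvU leg) else p2 rest

lemma aPass1_eq (legs : List (List (String × String))) :
    aPass1 legs = (p1 legs).map pvNorm := by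
  induction legs with
  | nil => rfl
  | cons leg rest ih => simp only [aPass1, p1]; split_ifs <;> simp [ih]

lemma aPass2_eq (legs : List (List (String × String))) :
    aPass2 legs = (p2 legs).map pvNorm := by
  induction legs with
  | nil => rfl
  | cons leg rest ih => simp only [aPass2, p2]; split_ifs <;> simp [ih]

lemma foldB (legs : List (List (String × String))) (a b : Option String) :
    legs.foldl bStep (a, b) =
      ((match a with | some x => some x | none => p1 legs),
       (match b with | some x => some x | none => p2 legs)) := by
  induction legs generalizing a b with
  | nil => cases a <;> cases b <;> rfl
  | cons leg rest ih =>
    simp only [List.foldl_cons, bStep, p1, p2]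
    by_cases hu : pvU leg = ""
    · cases a <;> cases b <;> simp [hu, ih]
    · simp only [if_neg hu]
      rw [ih]
      cases a <;> cases b <;> simp [hu] <;> split_ifs <;> simp_all

-- ===== VERDICT (by name: the statement is the Claim_ definition above) =====
theorem underlying_from_legs_py_spec : Claim_equal_underlying_from_legs_py := by
  intro legs _
  unfold Spec_underlying_from_legs_py underlying_from_legs_py underlying_from_legs_py_alt
  rw [foldB, aPass1_eq, aPass2_eq]
  cases legs with
  | nil => rfl
  | cons leg rest => cases h1 : p1 (leg :: rest) <;> cases h2 : p2 (leg :: rest) <;> simp
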